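-- pv_equiv track=rewrite | github.com/wooseokCho/ps_study | 하늘/PRO_BOJ/PRO_12973_짝지어제거하기.py | solution
-- ===== SOURCE A (Python) =====
-- def solution(s):
--     stack = []  # 스택을 활용하여 짝지어 있는 문자 추적
--
--     for char in s:
--         if stack and stack[-1] == char:
--             stack.pop()  # 짝이 맞는 문자이면 스택에서 제거
--         else:
--             stack.append(char)  # 짝이 맞지 않는 문자이면 스택에 추가
--
--     output = ''.join(stack)
--
--     if output =='' :
--         return 1
--     else:
--         return 0
-- ===== SOURCE B (Python) =====
-- def _reduce(t):
--     # fully cancel adjacent equal pairs: divide, reduce halves, cancel across the boundary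
--     if len(t) < 2:
--         return t
--     m = len(t) // 2
--     x = _reduce(t[:m])
--     y = _reduce(t[m:])
--     i, j = len(x), 0
--     while i > 0 and j < len(y) and x[i - 1] == y[j]:
--         i -= 1
--         j += 1
--     return x[:i] + y[j:]
--
-- def solution(s):
--     return 1 if _reduce(s) == '' else 0
-- ===== Notes on version B (the rewrite author's own statement) =====
-- stated objective: alternative
-- what changed: Replaces the single left-to-right stack pass with a divide-and-conquer reduction: recursively reduce each half of the string, then cancel equal characters across the boundary, and test whether the normal form is empty.
import Mathlib
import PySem

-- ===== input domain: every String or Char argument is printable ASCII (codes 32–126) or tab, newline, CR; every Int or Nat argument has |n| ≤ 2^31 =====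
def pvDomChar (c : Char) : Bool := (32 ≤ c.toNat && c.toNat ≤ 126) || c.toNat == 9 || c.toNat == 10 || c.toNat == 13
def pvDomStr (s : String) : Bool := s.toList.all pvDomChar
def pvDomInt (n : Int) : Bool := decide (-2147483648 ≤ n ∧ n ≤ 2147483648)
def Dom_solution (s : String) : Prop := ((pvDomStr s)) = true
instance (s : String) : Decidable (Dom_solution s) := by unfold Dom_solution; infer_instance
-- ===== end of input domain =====

-- B replaces A's single-pass stack with a divide-and-conquer reduction (reduce halves, cancel across the boundary); alternative algorithm, not claimed faster.


-- ===== PORT A =====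
-- one step of A's loop: 'if stack and stack[-1] == char: stack.pop() else: stack.append(char)'
-- (the stack is kept with its top at the HEAD of the list)
def stepA (st : List Char) (c : Char) : List Char :=
  match st with
  | top :: rest => if top = c then rest else c :: top :: rest
  | [] => [c]

def solution (s : String) : Int :=
  let stack := s.toList.foldl stepA []
  let output := String.ofList stack.reverse   -- ''.join(stack)
  if output = "" then 1 else 0

-- ===== PORT B =====
-- the boundary-cancelling while loop of _reduce: x is passed REVERSED (its head is x[i-1]),
-- y in order (its head is y[j]); popping both heads is 'i -= 1; j += 1'
def cancel : List Char → List Char → List Char × List Char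
  | a :: xr, b :: ys => if a = b then cancel xr ys else (a :: xr, b :: ys)
  | xr, ys => (xr, ys)

-- _reduce: split at len//2, reduce both halves, cancel across the boundary, glue
def reduceDC (l : List Char) : List Char :=
  if l.length < 2 then l
  else
    let m := l.length / 2   -- len(t) // 2: both arguments nonnegative, so Nat division is exact
    let x := reduceDC (l.take m)
    let y := reduceDC (l.drop m)
    let p := cancel x.reverse y
    p.1.reverse ++ p.2
termination_by l.length
decreasing_by
  · simp_all; omega
  · simp_all; omega

def solution_alt (s : String) : Int :=
  if String.ofList (reduceDC s.toList) = "" then 1 else 0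

-- ===== PRECONDITION & SPEC =====
def Spec_solution (s : String) (out : Int) : Prop := out = solution_alt s
instance (s : String) (out : Int) : Decidable (Spec_solution s out) := by unfold Spec_solution; infer_instance

-- ===== CLAIM (what is proved, stated in full; the proofs are below) =====
def Claim_equal_solution : Prop := ∀ (s : String), Dom_solution s → Spec_solution s (solution s)

-- ===== LEMMAS AND PROOFS =====

-- l' is obtained from l by repeatedly deleting an adjacent equal pair
inductive Deriv : List Char → List Char → Prop
  | refl (l : List Char) : Deriv l l
  | step (u : List Char) (c : Char) (v l' : List Char) :
      Deriv (u ++ v) l' → Deriv (u ++ c :: c :: v) l'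

theorem Deriv_trans {l m n : List Char} (h1 : Deriv l m) (h2 : Deriv m n) : Deriv l n := by
  induction h1 with
  | refl => exact h2
  | step u c v l' _ ih => exact Deriv.step u c v n (ih h2)

theorem Deriv_append_left {x x' : List Char} (y : List Char) (h : Deriv x x') :
    Deriv (x ++ y) (x' ++ y) := by
  induction h with
  | refl l => exact Deriv.refl _
  | step u c v l' _ ih =>
    have : u ++ c :: c :: v ++ y = u ++ c :: c :: (v ++ y) := by simp
    rw [this]
    exact Deriv.step u c (v ++ y) _ (by simpa using ih)

theorem Deriv_append_right (x : List Char) {y y' : List Char} (h : Deriv y y') :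
    Deriv (x ++ y) (x ++ y') := by
  induction h with
  | refl l => exact Deriv.refl _
  | step u c v l' _ ih =>
    have : x ++ (u ++ c :: c :: v) = (x ++ u) ++ c :: c :: v := by simp
    rw [this]
    exact Deriv.step (x ++ u) c v _ (by simpa using ih)

-- A's stack never holds two equal adjacent characters
theorem stepA_chain {st : List Char} (h : st.IsChain (· ≠ ·)) (c : Char) :
    (stepA st c).IsChain (· ≠ ·) := by
  match st with
  | [] => exact List.IsChain.singleton c
  | top :: rest =>
    by_cases htc : top = c
    · simp only [stepA, if_pos htc]; exact h.of_cons
    · simpa [stepA, htc] using List.isChain_cons_cons.mpr ⟨Ne.symm htc, h⟩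

-- feeding the same character twice into a duplicate-free stack is a no-op
theorem stepA_stepA {st : List Char} (h : st.IsChain (· ≠ ·)) (c : Char) :
    stepA (stepA st c) c = st := by
  match st with
  | [] => simp [stepA]
  | [top] =>
    by_cases htc : top = c <;> simp [stepA, htc]
  | top :: r :: rs =>
    by_cases htc : top = c
    · have hr : top ≠ r := (List.isChain_cons_cons.mp h).1
      subst htc
      simp [stepA, Ne.symm hr]
    · simp [stepA, htc]

-- deleting an adjacent equal pair from the input does not change A's stack
theorem foldl_stepA_cancel (u v : List Char) (c : Char) {st : List Char}
    (h : st.IsChain (· ≠ ·)) :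
    (u ++ c :: c :: v).foldl stepA st = (u ++ v).foldl stepA st := by
  induction u generalizing st with
  | nil => simp [List.foldl, stepA_stepA h c]
  | cons a t ih => exact ih (stepA_chain h a)

-- hence A's stack only depends on the normal form reached by pair deletions
theorem foldl_stepA_deriv {l l' : List Char} (h : Deriv l l') {st : List Char}
    (hst : st.IsChain (· ≠ ·)) : l.foldl stepA st = l'.foldl stepA st := by
  induction h generalizing st with
  | refl l => rfl
  | step u c v m _ ih => rw [foldl_stepA_cancel u v c hst, ih hst]

-- on an input with no adjacent equal pair, A's stack is just the reversed input
theorem foldl_stepA_id {l st : List Char} (h : (st.reverse ++ l).IsChain (· ≠ ·)) :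
    l.foldl stepA st = l.reverse ++ st := by
  induction l generalizing st with
  | nil => simp
  | cons c t ih =>
    have hpush : stepA st c = c :: st := by
      match st with
      | [] => simp [stepA]
      | top :: rest =>
        have : top ≠ c := by
          have := (List.isChain_append.mp h).2.2
          simpa [List.getLast?_reverse] using this top (by simp) c (by simp)
        simp [stepA, this]
    rw [List.foldl_cons, hpush, ih (by simpa using h)]
    simp

-- the boundary loop only deletes adjacent equal pairs of the concatenation
theorem cancel_deriv (xr y : List Char) :
    Deriv (xr.reverse ++ y) ((cancel xr y).1.reverse ++ (cancel xr y).2) := by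
  induction xr generalizing y with
  | nil => simp [cancel]; exact Deriv.refl _
  | cons a xr ih =>
    match y with
    | [] => simp [cancel]; exact Deriv.refl _
    | b :: ys =>
      by_cases hab : a = b
      · subst hab
        rw [cancel, if_pos rfl]
        have : (a :: xr).reverse ++ a :: ys = xr.reverse ++ a :: a :: ys := by simp
        rw [this]
        exact Deriv.step xr.reverse a ys _ (ih ys)
      · rw [cancel, if_neg hab]
        exact Deriv.refl _

-- the boundary loop's result has no adjacent equal pair when both inputs have none
theorem cancel_chain {xr y : List Char} (hx : xr.reverse.IsChain (· ≠ ·))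
    (hy : y.IsChain (· ≠ ·)) :
    ((cancel xr y).1.reverse ++ (cancel xr y).2).IsChain (· ≠ ·) := by
  induction xr generalizing y with
  | nil => simpa [cancel] using hy
  | cons a xr ih =>
    match y with
    | [] => simpa [cancel] using hx
    | b :: ys =>
      by_cases hab : a = b
      · rw [cancel, if_pos hab]
        exact ih (List.isChain_append.mp (by simpa using hx)).1 hy.of_cons
      · rw [cancel, if_neg hab]
        refine List.isChain_append.mpr ⟨by simpa using hx, hy, ?_⟩
        intro p hp q hq
        simp [List.getLast?_reverse] at hp hq
        subst hp; subst hq; exact hab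

-- reduceDC yields a pair-free list that is reachable from the input by pair deletions
theorem reduceDC_spec (l : List Char) :
    Deriv l (reduceDC l) ∧ (reduceDC l).IsChain (· ≠ ·) := by
  induction l using reduceDC.induct with
  | case1 l hlen =>
    rw [reduceDC, if_pos hlen]
    refine ⟨Deriv.refl l, ?_⟩
    match l with
    | [] => exact List.IsChain.nil
    | [a] => exact List.IsChain.singleton a
    | a :: b :: t => simp at hlen
  | case2 l hlen m ihx ihy =>
    have hred : reduceDC l =
        (cancel (reduceDC (l.take m)).reverse (reduceDC (l.drop m))).1.reverse
          ++ (cancel (reduceDC (l.take m)).reverse (reduceDC (l.drop m))).2 := by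
      rw [reduceDC, if_neg hlen]
    rw [hred]
    constructor
    · have h1 : Deriv l (reduceDC (l.take m) ++ l.drop m) := by
        simpa [List.take_append_drop] using Deriv_append_left (l.drop m) ihx.1
      have h2 := Deriv_append_right (reduceDC (l.take m)) ihy.1
      have h3 := cancel_deriv (reduceDC (l.take m)).reverse (reduceDC (l.drop m))
      rw [List.reverse_reverse] at h3
      exact Deriv_trans (Deriv_trans h1 h2) h3
    · exact cancel_chain (by simpa using ihx.2) ihy.2

-- A's stack computes the reverse of B's normal form
theorem foldl_eq_reduceDC (l : List Char) :
    l.foldl stepA [] = (reduceDC l).reverse := by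
  obtain ⟨hd, hc⟩ := reduceDC_spec l
  rw [foldl_stepA_deriv hd List.IsChain.nil, foldl_stepA_id (by simpa using hc)]
  simp

-- ===== VERDICT (by name: the statement is the Claim_ definition above) =====
theorem solution_spec : Claim_equal_solution := by
  intro s _
  unfold Spec_solution solution solution_alt
  rw [foldl_eq_reduceDC]
  simp
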